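-- pv_equiv track=rewrite | github.com/jk810/goog_fb | level2-1.py | answer
-- ===== SOURCE A (Python) =====
-- def answer(x, y):
--
--     x_id = 0            # x_id is the x value at y = 1
--     for i in range(1, x + 1):
--         x_id += i
--
--     n_ysteps = y - 1    # number of steps to go vertically
--
--     ID = x_id
--     for j in range(x, x + n_ysteps):
--         ID += j
--
--     return str(ID)
-- ===== SOURCE B (Python) =====
-- def answer(x, y):
--     # closed-form: sum(1..x) + sum(x .. x+y-2), each via the arithmetic-series formula
--     ID = x * (x + 1) // 2 if x > 0 else 0
--     if y > 1:
--         ID += (y - 1) * (2 * x + y - 2) // 2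
--     return str(ID)
-- ===== Notes on version B (the rewrite author's own statement) =====
-- stated objective: faster
-- what changed: replaces both summation loops with the closed-form arithmetic-series formula
import Mathlib
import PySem

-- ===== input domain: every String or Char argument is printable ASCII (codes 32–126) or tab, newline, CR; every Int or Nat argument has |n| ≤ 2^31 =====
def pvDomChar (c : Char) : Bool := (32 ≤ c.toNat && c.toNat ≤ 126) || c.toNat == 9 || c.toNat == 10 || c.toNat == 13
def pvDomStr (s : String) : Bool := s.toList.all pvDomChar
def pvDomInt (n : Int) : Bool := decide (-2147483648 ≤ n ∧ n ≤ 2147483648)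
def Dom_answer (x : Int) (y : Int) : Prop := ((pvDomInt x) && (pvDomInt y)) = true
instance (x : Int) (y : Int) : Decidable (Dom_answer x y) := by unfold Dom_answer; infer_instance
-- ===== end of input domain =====

-- B replaces A's two summation loops by the closed-form arithmetic-series formula (O(1) vs O(x+y)).

-- ===== PORT A =====
def answer (x : Int) (y : Int) : String :=
  let x_id : Int := (PySem.List.pyRange 1 (x + 1) 1).foldl (fun acc i => acc + i) 0
  let n_ysteps : Int := y - 1
  let ID : Int := (PySem.List.pyRange x (x + n_ysteps) 1).foldl (fun acc j => acc + j) x_id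
  PySem.Int.toStr ID

-- ===== PORT B =====
def answer_alt (x : Int) (y : Int) : String :=
  let ID : Int := if x > 0 then PySem.Int.floordiv (x * (x + 1)) 2 else 0
  let ID : Int := if y > 1 then ID + PySem.Int.floordiv ((y - 1) * (2 * x + y - 2)) 2 else ID
  PySem.Int.toStr ID

-- ===== PRECONDITION & SPEC =====
def Spec_answer (x : Int) (y : Int) (out : String) : Prop := out = answer_alt x y
instance (x : Int) (y : Int) (out : String) : Decidable (Spec_answer x y out) := by unfold Spec_answer; infer_instance

-- ===== CLAIM (what is proved, stated in full; the proofs are below) =====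
def Claim_equal_answer : Prop := ∀ (x : Int) (y : Int), Dom_answer x y → Spec_answer x y (answer x y)

-- ===== LEMMAS AND PROOFS =====

-- doubled sum of an arithmetic progression a, a+1, …, a+n-1
theorem pv_two_mul_sum (a : Int) (n : Nat) :
    2 * ((List.range n).map (fun k : Nat => a + (k : Int))).sum = 2 * a * n + n * (n - 1) := by
  induction n with
  | zero => simp
  | succ n ih =>
    rw [List.range_succ, List.map_append, List.sum_append]
    push_cast
    push_cast at ih
    simp only [List.map_cons, List.map_nil, List.sum_cons, List.sum_nil]
    nlinarith [ih]

theorem pv_two_mul_sum_pyRange (a b : Int) :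
    2 * (PySem.List.pyRange a b 1).sum = 2 * a * ((b - a).toNat : Int) + ((b - a).toNat : Int) * (((b - a).toNat : Int) - 1) := by
  rw [PySem.List.pyRange_one]
  exact pv_two_mul_sum a (b - a).toNat

-- ===== VERDICT (by name: the statement is the Claim_ definition above) =====
theorem pv_foldl_sum (l : List Int) (init : Int) :
    l.foldl (fun acc j => acc + j) init = init + l.sum := by
  simpa using PySem.List.foldl_add (l := l) (a := init) (g := fun j => j)

theorem answer_spec : Claim_equal_answer := by
  intro x y _
  unfold Spec_answer answer answer_alt
  simp only [pv_foldl_sum]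
  congr 1
  have h1 := pv_two_mul_sum_pyRange 1 (x + 1)
  have h2 := pv_two_mul_sum_pyRange x (x + (y - 1))
  have hd1 : PySem.Int.floordiv (x * (x + 1)) 2 = (x * (x + 1)) / 2 :=
    PySem.Int.floordiv_eq_ediv_of_pos (by omega)
  have hd2 : PySem.Int.floordiv ((y - 1) * (2 * x + y - 2)) 2 = ((y - 1) * (2 * x + y - 2)) / 2 :=
    PySem.Int.floordiv_eq_ediv_of_pos (by omega)
  rw [hd1, hd2]
  by_cases hx : x > 0
  · have hn1 : (((x + 1) - 1).toNat : Int) = x := by omega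
    rw [hn1] at h1
    by_cases hy : y > 1
    · have hn2 : ((x + (y - 1) - x).toNat : Int) = y - 1 := by omega
      rw [hn2] at h2
      simp only [hx, hy, if_pos]
      have he1 : x * (x + 1) / 2 * 2 = x * (x + 1) := by
        rcases Int.even_mul_succ_self x with ⟨k, hk⟩
        omega
      have he2 : (y - 1) * (2 * x + y - 2) / 2 * 2 = (y - 1) * (2 * x + y - 2) := by
        have : Even ((y - 1) * (2 * x + y - 2)) := by
          rcases Int.even_or_odd y with ⟨k, hk⟩ | ⟨k, hk⟩
          · exact ⟨(y - 1) * (x + k - 1), by subst hk; ring⟩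
          · exact ⟨k * (2 * x + y - 2), by subst hk; ring⟩
        rcases this with ⟨k, hk⟩
        omega
      ring_nf at h1 h2 he1 he2 ⊢; linarith
    · have hn2 : ((x + (y - 1) - x).toNat : Int) = 0 := by omega
      rw [hn2] at h2
      simp only [hx, if_pos, if_neg hy]
      have he1 : x * (x + 1) / 2 * 2 = x * (x + 1) := by
        rcases Int.even_mul_succ_self x with ⟨k, hk⟩
        omega
      ring_nf at h1 h2 he1 ⊢; linarith
  · have hn1 : (((x + 1) - 1).toNat : Int) = 0 := by omega
    rw [hn1] at h1
    by_cases hy : y > 1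
    · have hn2 : ((x + (y - 1) - x).toNat : Int) = y - 1 := by omega
      rw [hn2] at h2
      simp only [if_neg hx, if_pos hy]
      have he2 : (y - 1) * (2 * x + y - 2) / 2 * 2 = (y - 1) * (2 * x + y - 2) := by
        have : Even ((y - 1) * (2 * x + y - 2)) := by
          rcases Int.even_or_odd y with ⟨k, hk⟩ | ⟨k, hk⟩
          · exact ⟨(y - 1) * (x + k - 1), by subst hk; ring⟩
          · exact ⟨k * (2 * x + y - 2), by subst hk; ring⟩
        rcases this with ⟨k, hk⟩
        omega
      ring_nf at h1 h2 he2 ⊢; linarith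
    · have hn2 : ((x + (y - 1) - x).toNat : Int) = 0 := by omega
      rw [hn2] at h2
      simp only [if_neg hx, if_neg hy]
      ring_nf at h1 h2 ⊢; linarith
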